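-- pv_equiv track=rewrite | github.com/Jatan196/PP | q1.py | print_super_primes
-- ===== SOURCE A (Python) =====
-- def print_super_primes(n):
--     is_prime = [True] * (n + 1)
--     is_prime[0] = is_prime[1] = False
--
--     for p in range(2, n + 1):
--         if is_prime[p]:
--             for i in range(p * p, n + 1, p):
--                 is_prime[i] = False
--
--     super_primes = []
--     for p in range(2, n + 1):
--         if is_prime[p]:
--             digits = [int(digit) for digit in str(p)]
--             is_super_prime = all(is_prime[d] for d in digits)
--             if is_super_prime:
--                 super_primes.append(p)
--
--     return super_primes
-- ===== SOURCE B (Python) =====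
-- def print_super_primes(n):
--     # Same sieve prologue as the original (so n <= 0 still raises IndexError);
--     # but instead of scanning every number up to n, generate only the numbers
--     # whose digits are all prime digits (2,3,5,7), level by digit-length.
--     is_prime = [True] * (n + 1)
--     is_prime[0] = is_prime[1] = False
--     for p in range(2, n + 1):
--         if is_prime[p]:
--             for i in range(p * p, n + 1, p):
--                 is_prime[i] = False
--
--     result = []
--     level = [2, 3, 5, 7]
--     while level and level[0] <= n:
--         result.extend(c for c in level if c <= n and is_prime[c])
--         level = [10 * c + d for c in level for d in (2, 3, 5, 7)]
--     return result
-- ===== Notes on version B (the rewrite author's own statement) =====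
-- stated objective: faster
-- what changed: B keeps A's sieve prologue but replaces the scan of all integers 2..n (stringifying every prime to test its digits) by generating only the numbers composed of prime digits 2,3,5,7, level by digit-length, keeping those <= n that the sieve marks prime.
import Mathlib
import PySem

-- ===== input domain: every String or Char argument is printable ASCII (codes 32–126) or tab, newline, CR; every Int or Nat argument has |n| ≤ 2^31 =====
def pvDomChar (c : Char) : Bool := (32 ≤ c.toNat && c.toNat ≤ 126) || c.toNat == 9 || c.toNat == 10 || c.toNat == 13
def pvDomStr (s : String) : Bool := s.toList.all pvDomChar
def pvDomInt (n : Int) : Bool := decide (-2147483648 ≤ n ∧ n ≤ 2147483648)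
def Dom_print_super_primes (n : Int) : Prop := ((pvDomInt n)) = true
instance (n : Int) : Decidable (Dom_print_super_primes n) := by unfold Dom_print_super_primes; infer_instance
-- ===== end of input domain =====

-- B keeps A's sieve but generates only numbers made of the prime digits 2,3,5,7
-- (level by digit-length) instead of scanning and stringifying every integer 2..n.

-- ===== PORT A =====
-- shared helper: the sieve prologue, textually identical in Source A and Source B.
-- The Python list is carried as an Array Bool (O(1) updates); setIfInBounds/getD
-- are the total forms of is_prime[i] = False / is_prime[i] — under Pre_ (1 ≤ n)
-- every index used is nonnegative and in range, so they are exact.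
-- Array.replicate (n+1).toNat true = [True]*(n+1) (empty for n+1 ≤ 0, as in Python).
def pvSieve (n : Int) : Array Bool :=
  let ip0 := ((Array.replicate (n + 1).toNat true).setIfInBounds 0 false).setIfInBounds 1 false
  (PySem.List.pyRange 2 (n + 1) 1).foldl
    (fun ip p =>
      if ip.getD p.toNat false then
        (PySem.List.pyRange (p * p) (n + 1) p).foldl
          (fun a i => a.setIfInBounds i.toNat false) ip
      else ip) ip0

-- int(digit) on a single decimal digit char never raises, so .getD 0 is exact here.
def print_super_primes (n : Int) : List Int :=
  let is_prime := pvSieve n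
  (PySem.List.pyRange 2 (n + 1) 1).foldl
    (fun acc p =>
      if is_prime.getD p.toNat false then
        let digits := (PySem.Int.toStr p).toList.map
          (fun c => (PySem.Int.ofStr? (String.singleton c)).getD 0)
        if digits.all (fun d => is_prime.getD d.toNat false) then acc ++ [p]
        else acc
      else acc) []

-- ===== PORT B =====
-- level = [10*c + d for c in level for d in (2,3,5,7)]
-- (candidates are kept as Nat: they are built from 2,3,5,7 and are always ≥ 2)
def pvExtend (level : List Nat) : List Nat :=
  level.flatMap (fun c => [10 * c + 2, 10 * c + 3, 10 * c + 5, 10 * c + 7])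

-- while level and level[0] <= n: extend result; move to the next digit-length.
-- The Nat fuel is only a totality guard: the loop stops by itself once
-- level[0] > n, and the fuel passed below is large enough that it never runs out.
def pvLoop (n : Int) (ip : Array Bool) : Nat -> List Nat -> List Int -> List Int
  | 0, _, acc => acc
  | f + 1, level, acc =>
    match level with
    | [] => acc
    | h :: t =>
      if (h : Int) <= n then
        pvLoop n ip f (pvExtend (h :: t))
          (acc ++ (h :: t).filterMap
            (fun (c : Nat) => if decide ((c : Int) <= n) && ip.getD c false
                      then some (c : Int) else none))
      else acc

def print_super_primes_alt (n : Int) : List Int :=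
  pvLoop n (pvSieve n) (n.toNat + 1) [2, 3, 5, 7] []

-- ===== PRECONDITION & SPEC =====
-- Python A raises IndexError for n ≤ 0 (is_prime[0] / is_prime[1] on a too-short list);
-- B raises there identically.  Pre_ admits exactly the inputs where A returns.
def Pre_print_super_primes (n : Int) : Prop := 1 ≤ n
instance (n : Int) : Decidable (Pre_print_super_primes n) := by
  unfold Pre_print_super_primes; infer_instance

def pvWitness_print_super_primes : Int := 30

def Spec_print_super_primes (n : Int) (out : List Int) : Prop := out = print_super_primes_alt n
instance (n : Int) (out : List Int) : Decidable (Spec_print_super_primes n out) := by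
  unfold Spec_print_super_primes; infer_instance

-- ===== CLAIM (what is proved, stated in full; the proofs are below) =====
def Claim_equal_print_super_primes : Prop :=
  ∀ (n : Int), Dom_print_super_primes n → Pre_print_super_primes n →
    Spec_print_super_primes n (print_super_primes n)

-- ===== LEMMAS AND PROOFS =====

-- ---- proof-only helpers ----

-- sieve values at indices 0..9 (for n ≥ 10)
def pvTable : List Bool := [false, false, true, true, false, true, false, true, false, false]

-- "every base-10 digit of m is one of 2,3,5,7"
def pvGood (m : Nat) : Bool :=
  if _h : m < 10 then decide (m = 2 ∨ m = 3 ∨ m = 5 ∨ m = 7)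
  else (decide (m % 10 = 2 ∨ m % 10 = 3 ∨ m % 10 = 5 ∨ m % 10 = 7)) && pvGood (m / 10)

-- the base-10 digits of m, most significant first
def pvRep (m : Nat) : List Nat :=
  if _h : m < 10 then [m] else pvRep (m / 10) ++ [m % 10]

def pvD (d : Nat) : Prop := d = 2 ∨ d = 3 ∨ d = 5 ∨ d = 7

-- m is obtainable from c by appending digits 2,3,5,7 on the right
inductive pvDesc : Nat → Nat → Prop
  | refl (c : Nat) : pvDesc c c
  | step {c d m : Nat} : pvD d → pvDesc (10 * c + d) m → pvDesc c m

def pvInv (lv : List Nat) : Prop :=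
  lv.Pairwise (· < ·) ∧ (∀ c ∈ lv, 2 ≤ c) ∧ (∀ a ∈ lv, ∀ b ∈ lv, a < 10 * b)

-- list-level model of the Array sieve (proof-only)
def pvMarkF : List Bool → Int → List Bool := fun l i => l.set i.toNat false

-- ---- mark-fold lemmas ----

theorem pv_len_markFold (idxs : List Int) (l : List Bool) :
    (idxs.foldl pvMarkF l).length = l.length := by
  induction idxs generalizing l with
  | nil => rfl
  | cons a t ih => simp only [List.foldl_cons]; rw [ih]; simp [pvMarkF]

theorem pv_getD_markFold_notmem (idxs : List Int) (l : List Bool) (j : Nat)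
    (hpos : ∀ i ∈ idxs, 0 < i) (hne : ∀ i ∈ idxs, i ≠ (j : Int)) :
    (idxs.foldl pvMarkF l).getD j false = l.getD j false := by
  induction idxs generalizing l with
  | nil => rfl
  | cons a t ih =>
    have ha : 0 < a := hpos a (by simp)
    have hane : a ≠ (j : Int) := hne a (by simp)
    simp only [List.foldl_cons]
    rw [ih _ (fun i hi => hpos i (List.mem_cons_of_mem _ hi)) (fun i hi => hne i (List.mem_cons_of_mem _ hi))]
    show (l.set a.toNat false).getD j false = l.getD j false
    rw [List.getD_eq_getElem?_getD, List.getD_eq_getElem?_getD,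
      List.getElem?_set_ne (by omega)]

theorem pv_getD_markFold_false (idxs : List Int) (l : List Bool) (j : Nat)
    (hpos : ∀ i ∈ idxs, 0 < i) (h : l.getD j false = false) :
    (idxs.foldl pvMarkF l).getD j false = false := by
  induction idxs generalizing l with
  | nil => exact h
  | cons a t ih =>
    have ha : 0 < a := hpos a (by simp)
    simp only [List.foldl_cons]
    apply ih _ (fun i hi => hpos i (List.mem_cons_of_mem _ hi))
    show (l.set a.toNat false).getD j false = false
    by_cases hj : a.toNat = j
    · subst hj
      rcases Nat.lt_or_ge a.toNat l.length with hl | hl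
      · rw [List.getD_eq_getElem?_getD, List.getElem?_set_self hl]; rfl
      · rw [List.set_eq_of_length_le hl]; exact h
    · rwa [List.getD_eq_getElem?_getD, List.getElem?_set_ne hj,
        ← List.getD_eq_getElem?_getD]

theorem pv_getD_markFold_mem (idxs : List Int) (l : List Bool) (j : Nat)
    (hpos : ∀ i ∈ idxs, 0 < i) (hmem : (j : Int) ∈ idxs) (hlt : j < l.length) :
    (idxs.foldl pvMarkF l).getD j false = false := by
  induction idxs generalizing l with
  | nil => simp at hmem
  | cons a t ih =>
    simp only [List.foldl_cons]
    rcases List.mem_cons.1 hmem with hja | hjt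
    · apply pv_getD_markFold_false t _ j (fun i hi => hpos i (List.mem_cons_of_mem _ hi))
      show (l.set a.toNat false).getD j false = false
      have haj : a.toNat = j := by omega
      subst haj
      rw [List.getD_eq_getElem?_getD, List.getElem?_set_self hlt]; rfl
    · apply ih _ (fun i hi => hpos i (List.mem_cons_of_mem _ hi)) hjt
      show j < (l.set a.toNat false).length
      rw [List.length_set]; exact hlt

theorem pv_getD_mark_range (a b step : Int) (hs : 0 < step) (ha : 0 < a)
    (l : List Bool) (j : Nat) (hjl : j < l.length) :
    ((PySem.List.pyRange a b step).foldl pvMarkF l).getD j false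
      = if a ≤ (j : Int) ∧ (j : Int) < b ∧ step ∣ ((j : Int) - a) then false
        else l.getD j false := by
  have hpos : ∀ i ∈ PySem.List.pyRange a b step, 0 < i := by
    intro i hi
    have := (PySem.List.mem_pyRange_iff_of_pos hs _).1 hi
    omega
  split
  · next hc =>
    exact pv_getD_markFold_mem _ _ _ hpos
      ((PySem.List.mem_pyRange_iff_of_pos hs _).2 ⟨hc.1, hc.2.1, hc.2.2⟩) hjl
  · next hc =>
    refine pv_getD_markFold_notmem _ _ _ hpos (fun i hi hij => hc ?_)
    subst hij
    exact (PySem.List.mem_pyRange_iff_of_pos hs _).1 hi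

-- ---- sieve prefix ----

def pvStep (n : Int) : List Bool → Int → List Bool := fun ip p =>
  if ip.getD p.toNat false then
    (PySem.List.pyRange (p * p) (n + 1) p).foldl pvMarkF ip
  else ip

theorem pv_len_step (n : Int) (ip : List Bool) (p : Int) :
    (pvStep n ip p).length = ip.length := by
  unfold pvStep
  split
  · exact pv_len_markFold _ _
  · rfl

theorem pv_getD_step_high (n : Int) (ip : List Bool) (p : Int) (hp : 4 ≤ p)
    (j : Nat) (hj : j ≤ 9) :
    (pvStep n ip p).getD j false = ip.getD j false := by
  unfold pvStep
  split
  · apply pv_getD_markFold_notmem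
    · intro i hi
      have := (PySem.List.mem_pyRange_iff_of_pos (by nlinarith) i).1 hi
      nlinarith [this.1]
    · intro i hi
      have := (PySem.List.mem_pyRange_iff_of_pos (by nlinarith) i).1 hi
      have h16 : (16 : Int) ≤ p * p := by nlinarith
      have : (16 : Int) ≤ i := le_trans h16 this.1
      omega
  · rfl

theorem pv_getD_foldl_step_high (n : Int) (ps : List Int) (ip : List Bool)
    (hps : ∀ p ∈ ps, 4 ≤ p) (j : Nat) (hj : j ≤ 9) :
    (ps.foldl (pvStep n) ip).getD j false = ip.getD j false := by
  induction ps generalizing ip with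
  | nil => rfl
  | cons p t ih =>
    simp only [List.foldl_cons]
    rw [ih _ (fun q hq => hps q (List.mem_cons_of_mem _ hq))]
    exact pv_getD_step_high n ip p (hps p (by simp)) j hj

-- the list-level sieve the proofs reason about
def pvLS (n : Int) : List Bool :=
  (PySem.List.pyRange 2 (n + 1) 1).foldl (pvStep n)
    (((List.replicate (n + 1).toNat true).set 0 false).set 1 false)

theorem pv_arr_getD (a : Array Bool) (i : Nat) : a.getD i false = a.toList.getD i false := by
  rcases Nat.lt_or_ge i a.size with h | h
  · simp [Array.getD, h, List.getD, Array.getElem_toList]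
  · simp [Array.getD, Nat.not_lt.2 h, List.getD, h]

theorem pv_sieve_toList (n : Int) : (pvSieve n).toList = pvLS n := by
  have hstep : ∀ (a : Array Bool) (p : Int),
      pvStep n a.toList p
        = (if a.getD p.toNat false then
            (PySem.List.pyRange (p * p) (n + 1) p).foldl
              (fun a i => a.setIfInBounds i.toNat false) a
          else a).toList := by
    intro a p
    unfold pvStep
    rw [← pv_arr_getD]
    split
    · exact List.foldl_hom (fun a : Array Bool => a.toList)
        (fun x y => by simp [pvMarkF, Array.toList_setIfInBounds])
    · rfl
  unfold pvSieve pvLS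
  dsimp only
  rw [show ((List.replicate (n + 1).toNat true).set 0 false).set 1 false
      = (((Array.replicate (n + 1).toNat true).setIfInBounds 0 false).setIfInBounds 1 false).toList from by
    simp [Array.toList_setIfInBounds, Array.toList_replicate]]
  exact (List.foldl_hom _ hstep).symm

theorem pv_table_val : ∀ r < 10, pvTable.getD r false = decide (r = 2 ∨ r = 3 ∨ r = 5 ∨ r = 7) := by
  decide

theorem pv_sieve_prefix (n : Int) (hn : 10 ≤ n) (j : Nat) (hj : j ≤ 9) :
    (pvLS n).getD j false = pvTable.getD j false := by
  unfold pvLS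
  set ip0 := ((List.replicate (n + 1).toNat true).set 0 false).set 1 false with hip0def
  have hlen0 : ip0.length = (n + 1).toNat := by
    rw [hip0def]; simp
  have hip0 : ∀ k : Nat, k ≤ 9 → ip0.getD k false = decide (2 ≤ k) := by
    intro k hk
    have hklen : k < (n + 1).toNat := by omega
    rw [hip0def]
    interval_cases k <;>
      simp [List.getD_eq_getElem?_getD, hklen]
  rw [PySem.List.pyRange_one_append 2 10 (n + 1) (by norm_num) (by omega), List.foldl_append]
  rw [pv_getD_foldl_step_high n _ _ (fun p hp => by
    have := (PySem.List.mem_pyRange_one).1 hp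
    omega) j hj]
  have h210 : PySem.List.pyRange 2 10 1 = [2, 3, 4, 5, 6, 7, 8, 9] := by decide
  rw [h210]
  simp only [List.foldl_cons, List.foldl_nil]
  rw [pv_getD_step_high n _ 9 (by norm_num) j hj, pv_getD_step_high n _ 8 (by norm_num) j hj,
    pv_getD_step_high n _ 7 (by norm_num) j hj, pv_getD_step_high n _ 6 (by norm_num) j hj,
    pv_getD_step_high n _ 5 (by norm_num) j hj, pv_getD_step_high n _ 4 (by norm_num) j hj]
  have t2 : ip0.getD (2 : Int).toNat false = true := by
    rw [show ((2 : Int)).toNat = 2 from rfl]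
    simpa using hip0 2 (by norm_num)
  have h2 : ∀ k : Nat, k ≤ 9 →
      (pvStep n ip0 2).getD k false = decide (k = 2 ∨ k = 3 ∨ k = 5 ∨ k = 7 ∨ k = 9) := by
    intro k hk
    unfold pvStep
    rw [t2, if_pos rfl]
    rw [pv_getD_mark_range (2 * 2) (n + 1) 2 (by norm_num) (by norm_num) ip0 k
      (by rw [hlen0]; omega)]
    rw [hip0 k hk]
    interval_cases k <;> simp <;> omega
  have hl2 : (pvStep n ip0 2).length = (n + 1).toNat := by rw [pv_len_step, hlen0]
  have t3 : (pvStep n ip0 2).getD (3 : Int).toNat false = true := by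
    rw [show ((3 : Int)).toNat = 3 from rfl]
    simpa using h2 3 (by norm_num)
  have h3 : ∀ k : Nat, k ≤ 9 →
      (pvStep n (pvStep n ip0 2) 3).getD k false = decide (k = 2 ∨ k = 3 ∨ k = 5 ∨ k = 7) := by
    intro k hk
    conv_lhs => rw [pvStep]
    rw [t3, if_pos rfl]
    rw [pv_getD_mark_range (3 * 3) (n + 1) 3 (by norm_num) (by norm_num) _ k
      (by rw [hl2]; omega)]
    rw [h2 k hk]
    interval_cases k <;> simp <;> omega
  rw [h3 j hj]
  exact (pv_table_val j (by omega)).symm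

-- ---- digits of p (A side) ----

theorem pv_toDigitsCore_eq (m : Nat) : ∀ (f : Nat), m < f → ∀ (ds : List Char),
    Nat.toDigitsCore 10 f m ds = (pvRep m).map Nat.digitChar ++ ds := by
  induction m using Nat.strong_induction_on with
  | _ m ih =>
    intro f hf ds
    obtain ⟨f, rfl⟩ : ∃ f', f = f' + 1 := ⟨f - 1, by omega⟩
    by_cases h10 : m < 10
    · have hq : m / 10 = 0 := Nat.div_eq_of_lt h10
      simp [Nat.toDigitsCore, hq, pvRep, h10, Nat.mod_eq_of_lt h10]
    · have hq : m / 10 ≠ 0 := by omega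
      rw [show Nat.toDigitsCore 10 (f + 1) m ds
          = Nat.toDigitsCore 10 f (m / 10) (Nat.digitChar (m % 10) :: ds) from by
        simp [Nat.toDigitsCore, hq]]
      rw [ih (m / 10) (by omega) f (by omega) _]
      conv_rhs => rw [pvRep, dif_neg h10]
      simp

theorem pv_toChars_eq (m : Nat) :
    PySem.Int.toChars (m : Int) = (pvRep m).map Nat.digitChar := by
  unfold PySem.Int.toChars
  rw [if_neg (by omega)]
  rw [Int.toNat_natCast, Nat.toDigits]
  rw [pv_toDigitsCore_eq m (m + 1) (by omega)]
  simp

theorem pv_rep_lt (m : Nat) : ∀ d ∈ pvRep m, d < 10 := by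
  induction m using Nat.strong_induction_on with
  | _ m ih =>
    intro d hd
    by_cases h10 : m < 10
    · rw [pvRep, dif_pos h10] at hd
      simp at hd; omega
    · rw [pvRep, dif_neg h10] at hd
      rcases List.mem_append.1 hd with h | h
      · exact ih (m / 10) (by omega) d h
      · simp at h; omega

theorem pv_val_digitChar (d : Nat) (hd : d < 10) :
    (PySem.Int.ofStr? (String.singleton (Nat.digitChar d))).getD 0 = (d : Int) := by
  interval_cases d <;> decide

theorem pv_rep_all_table (m : Nat) :
    ((pvRep m).all fun d => pvTable.getD d false) = pvGood m := by
  induction m using Nat.strong_induction_on with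
  | _ m ih =>
    by_cases h10 : m < 10
    · rw [pvRep, dif_pos h10, pvGood, dif_pos h10]
      simp only [List.all_cons, List.all_nil, Bool.and_true]
      rw [pv_table_val m h10]
    · rw [pvRep, dif_neg h10, pvGood, dif_neg h10, List.all_append]
      rw [ih (m / 10) (by omega)]
      have hr : m % 10 < 10 := Nat.mod_lt _ (by norm_num)
      simp only [List.all_cons, List.all_nil, Bool.and_true]
      rw [pv_table_val _ hr]
      exact Bool.and_comm _ _

-- A's digit test, for n ≥ 10, equals pvGood
theorem pv_digits_iff (n : Int) (hn : 10 ≤ n) (m : Nat) :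
    (((PySem.Int.toStr (m : Int)).toList.map
        (fun c => (PySem.Int.ofStr? (String.singleton c)).getD 0)).all
      (fun d => (pvSieve n).getD d.toNat false)) = pvGood m := by
  rw [PySem.Int.toList_toStr, pv_toChars_eq, List.map_map]
  rw [← pv_rep_all_table m]
  have gen : ∀ (l : List Nat), (∀ d ∈ l, d < 10) →
      (l.map (((fun c => (PySem.Int.ofStr? (String.singleton c)).getD 0)) ∘ Nat.digitChar)).all
        (fun d => (pvSieve n).getD d.toNat false)
      = l.all (fun d => pvTable.getD d false) := by
    intro l
    induction l with
    | nil => intro _; rfl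
    | cons d t iht =>
      intro hlt
      have hd : d < 10 := hlt d (by simp)
      simp only [List.map_cons, List.all_cons]
      rw [iht (fun x hx => hlt x (List.mem_cons_of_mem _ hx))]
      congr 1
      show (pvSieve n).getD
        ((PySem.Int.ofStr? (String.singleton (Nat.digitChar d))).getD 0).toNat false = _
      rw [pv_val_digitChar d hd, Int.toNat_natCast, pv_arr_getD, pv_sieve_toList]
      exact pv_sieve_prefix n hn d (by omega)
  exact gen (pvRep m) (pv_rep_lt m)

-- ---- A as a filter ----

theorem pv_foldl_two_if (l : List Int) (c1 c2 : Int → Bool) (acc : List Int) :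
    l.foldl (fun acc p => if c1 p then if c2 p then acc ++ [p] else acc else acc) acc
      = acc ++ l.filter (fun p => c1 p && c2 p) := by
  induction l generalizing acc with
  | nil => simp
  | cons a t ih =>
    simp only [List.foldl_cons, List.filter_cons]
    by_cases h1 : c1 a <;> by_cases h2 : c2 a <;>
      simp [h1, h2, ih, List.append_assoc]

theorem pv_A_eq_filter (n : Int) :
    print_super_primes n = (PySem.List.pyRange 2 (n + 1) 1).filter
      (fun p => (pvSieve n).getD p.toNat false &&
        (((PySem.Int.toStr p).toList.map
            (fun c => (PySem.Int.ofStr? (String.singleton c)).getD 0)).all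
          (fun d => (pvSieve n).getD d.toNat false))) := by
  exact (pv_foldl_two_if _ _ _ _).trans (List.nil_append _)

-- ---- pvDesc lemmas (B side) ----

theorem pv_desc_le {c m : Nat} (h : pvDesc c m) : c ≤ m := by
  induction h with
  | refl c => exact le_refl c
  | step hd h ih => omega

theorem pv_desc_iff (c m : Nat) :
    pvDesc c m ↔ m = c ∨ ∃ d, pvD d ∧ pvDesc (10 * c + d) m := by
  constructor
  · intro h
    cases h with
    | refl => exact Or.inl rfl
    | step hd h => exact Or.inr ⟨_, hd, h⟩
  · rintro (rfl | ⟨d, hd, h⟩)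
    · exact pvDesc.refl m
    · exact pvDesc.step hd h

theorem pv_desc_snoc {c m d : Nat} (h : pvDesc c m) (hd : pvD d) :
    pvDesc c (10 * m + d) := by
  induction h with
  | refl c => exact pvDesc.step hd (pvDesc.refl _)
  | step hd' h ih => exact pvDesc.step hd' ih

theorem pv_good_step {c d : Nat} (hc : 1 ≤ c) (hg : pvGood c = true) (hd : pvD d) :
    pvGood (10 * c + d) = true := by
  have hd' : d < 10 := by rcases hd with h | h | h | h <;> omega
  rw [pvGood, dif_neg (by omega)]
  have h1 : (10 * c + d) % 10 = d := by omega
  have h2 : (10 * c + d) / 10 = c := by omega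
  rw [h1, h2, hg]
  rcases hd with h | h | h | h <;> subst h <;> rfl

theorem pv_good_of_desc {c m : Nat} (h : pvDesc c m) : 1 ≤ c → pvGood c = true →
    pvGood m = true := by
  induction h with
  | refl c => exact fun _ hg => hg
  | step hd h ih =>
    intro hc hg
    exact ih (by rcases hd with h | h | h | h <;> omega) (pv_good_step hc hg hd)

theorem pv_desc_of_good (m : Nat) : pvGood m = true →
    ∃ c, pvD c ∧ pvDesc c m := by
  induction m using Nat.strong_induction_on with
  | _ m ih =>
    intro hg
    by_cases h10 : m < 10
    · rw [pvGood, dif_pos h10] at hg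
      simp only [decide_eq_true_eq] at hg
      exact ⟨m, hg, pvDesc.refl m⟩
    · rw [pvGood, dif_neg h10] at hg
      simp only [Bool.and_eq_true, decide_eq_true_eq] at hg
      obtain ⟨c, hc, hd⟩ := ih (m / 10) (by omega) hg.2
      refine ⟨c, hc, ?_⟩
      have := pv_desc_snoc hd (show pvD (m % 10) from hg.1)
      rwa [show 10 * (m / 10) + m % 10 = m from by omega] at this

theorem pv_mem_extend (lv : List Nat) (x : Nat) :
    x ∈ pvExtend lv ↔ ∃ c ∈ lv, ∃ d, pvD d ∧ x = 10 * c + d := by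
  simp only [pvExtend, List.mem_flatMap, List.mem_cons, List.not_mem_nil, or_false, pvD]
  constructor
  · rintro ⟨c, hc, h | h | h | h⟩ <;>
      exact ⟨c, hc, _, by simp, h⟩
  · rintro ⟨c, hc, d, (rfl | rfl | rfl | rfl), rfl⟩ <;> exact ⟨c, hc, by simp⟩

theorem pv_level_decomp (lv : List Nat) (m : Nat) :
    (∃ c ∈ lv, pvDesc c m) ↔ m ∈ lv ∨ ∃ c' ∈ pvExtend lv, pvDesc c' m := by
  constructor
  · rintro ⟨c, hcl, hd⟩
    rcases (pv_desc_iff c m).1 hd with rfl | ⟨d, hd', hdesc⟩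
    · exact Or.inl hcl
    · exact Or.inr ⟨10 * c + d, (pv_mem_extend lv _).2 ⟨c, hcl, d, hd', rfl⟩, hdesc⟩
  · rintro (hm | ⟨c', hc', hdesc⟩)
    · exact ⟨m, hm, pvDesc.refl m⟩
    · obtain ⟨c, hcl, d, hd, rfl⟩ := (pv_mem_extend lv c').1 hc'
      exact ⟨c, hcl, (pv_desc_iff c m).2 (Or.inr ⟨d, hd, hdesc⟩)⟩

theorem pv_inv_extend (lv : List Nat) (h : pvInv lv) : pvInv (pvExtend lv) := by
  obtain ⟨hpw, h2, h3⟩ := h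
  refine ⟨?_, ?_, ?_⟩
  · clear h2 h3
    induction lv with
    | nil => exact List.Pairwise.nil
    | cons c t ih =>
      rw [List.pairwise_cons] at hpw
      show List.Pairwise _ ([10 * c + 2, 10 * c + 3, 10 * c + 5, 10 * c + 7] ++ pvExtend t)
      rw [List.pairwise_append]
      refine ⟨by simp, ih hpw.2, ?_⟩
      intro x hx y hy
      obtain ⟨b, hb, d, hd, rfl⟩ := (pv_mem_extend t y).1 hy
      have hcb : c < b := hpw.1 b hb
      have hd' : 2 ≤ d := by rcases hd with h | h | h | h <;> omega
      simp only [List.mem_cons, List.not_mem_nil, or_false] at hx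
      rcases hx with rfl | rfl | rfl | rfl <;> omega
  · intro c' hc'
    obtain ⟨c, _, d, hd, rfl⟩ := (pv_mem_extend lv c').1 hc'
    rcases hd with h | h | h | h <;> omega
  · intro a' ha' b' hb'
    obtain ⟨a, ha, d1, hd1, rfl⟩ := (pv_mem_extend lv a').1 ha'
    obtain ⟨b, hb, d2, hd2, rfl⟩ := (pv_mem_extend lv b').1 hb'
    have := h3 a ha b hb
    have e1 : d1 ≤ 7 := by rcases hd1 with h | h | h | h <;> omega
    have e2 : 2 ≤ d2 := by rcases hd2 with h | h | h | h <;> omega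
    omega

-- ---- pvLoop characterisation ----

theorem pv_mem_loop (n : Int) (ip : Array Bool) : ∀ (f : Nat) (lv : List Nat) (acc : List Int),
    (∀ c ∈ lv, (n : Int) < 10 ^ f * (c : Int)) → pvInv lv → ∀ x : Int,
    (x ∈ pvLoop n ip f lv acc ↔ x ∈ acc ∨ ∃ m : Nat, (∃ c ∈ lv, pvDesc c m) ∧
      (m : Int) ≤ n ∧ ip.getD m false = true ∧ x = (m : Int)) := by
  intro f
  induction f with
  | zero =>
    intro lv acc hf hinv x
    simp only [pvLoop]
    constructor
    · exact Or.inl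
    · rintro (h | ⟨m, ⟨c, hcl, hdesc⟩, hmn, _, rfl⟩)
      · exact h
      · exfalso
        have h1 := hf c hcl
        have h2 : (c : Int) ≤ (m : Int) := by exact_mod_cast pv_desc_le hdesc
        simp only [pow_zero, one_mul] at h1
        omega
  | succ f ih =>
    intro lv acc hf hinv x
    match lv with
    | [] =>
      simp only [pvLoop]
      constructor
      · exact Or.inl
      · rintro (h | ⟨m, ⟨c, hcl, _⟩, _⟩)
        · exact h
        · simp at hcl
    | h :: t =>
      simp only [pvLoop]
      by_cases hle : (h : Int) ≤ n
      · rw [if_pos hle]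
        have hf' : ∀ c' ∈ pvExtend (h :: t), (n : Int) < 10 ^ f * (c' : Int) := by
          intro c' hc'
          obtain ⟨c, hc, d, hd, rfl⟩ := (pv_mem_extend _ _).1 hc'
          have hb := hf c hc
          have hp : (0 : Int) < 10 ^ f := by positivity
          have hd2 : 2 ≤ d := by rcases hd with h | h | h | h <;> omega
          rw [pow_succ] at hb
          push_cast
          nlinarith
        rw [ih (pvExtend (h :: t)) _ hf' (pv_inv_extend _ hinv) x]
        constructor
        · rintro (hx | ⟨m, hdesc', hmn, hip, rfl⟩)
          · rcases List.mem_append.1 hx with h1 | h2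
            · exact Or.inl h1
            · simp only [List.mem_filterMap] at h2
              obtain ⟨c, hcl, hc⟩ := h2
              by_cases hcnd : decide ((c : Int) ≤ n) && ip.getD c false
              · rw [if_pos hcnd] at hc
                rw [Bool.and_eq_true, decide_eq_true_eq] at hcnd
                cases hc
                exact Or.inr ⟨c, ⟨c, hcl, pvDesc.refl c⟩, hcnd.1, hcnd.2, rfl⟩
              · rw [if_neg hcnd] at hc
                cases hc
          · exact Or.inr ⟨m, (pv_level_decomp _ m).2 (Or.inr hdesc'), hmn, hip, rfl⟩
        · rintro (hx | ⟨m, hdesc, hmn, hip, rfl⟩)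
          · exact Or.inl (List.mem_append.2 (Or.inl hx))
          · rcases (pv_level_decomp _ m).1 hdesc with hm | hext
            · refine Or.inl (List.mem_append.2 (Or.inr ?_))
              simp only [List.mem_filterMap]
              exact ⟨m, hm, by rw [if_pos (by simp [hmn, hip])]⟩
            · exact Or.inr ⟨m, hext, hmn, hip, rfl⟩
      · rw [if_neg hle]
        constructor
        · exact Or.inl
        · rintro (hx | ⟨m, ⟨c, hcl, hdesc⟩, hmn, _, rfl⟩)
          · exact hx
          · exfalso
            have hhc : h ≤ c := by
              rcases List.mem_cons.1 hcl with rfl | hct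
              · exact le_refl _
              · exact le_of_lt ((List.pairwise_cons.1 hinv.1).1 c hct)
            have hcm : c ≤ m := pv_desc_le hdesc
            have : (h : Int) ≤ (m : Int) := by exact_mod_cast le_trans hhc hcm
            omega

theorem pv_loop_pairwise (n : Int) (ip : Array Bool) : ∀ (f : Nat) (lv : List Nat) (acc : List Int),
    pvInv lv → acc.Pairwise (· < ·) →
    (∀ a ∈ acc, ∀ c ∈ lv, a < (c : Int)) →
    (pvLoop n ip f lv acc).Pairwise (· < ·) := by
  have hfm : ∀ (g : Nat → Option Int), (∀ c y, g c = some y → y = (c : Int)) →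
      ∀ (l : List Nat), l.Pairwise (· < ·) → (l.filterMap g).Pairwise (· < ·) := by
    intro g hg l hl
    induction l with
    | nil => exact List.Pairwise.nil
    | cons a t iht =>
      rw [List.pairwise_cons] at hl
      rw [List.filterMap_cons]
      cases hga : g a with
      | none => exact iht hl.2
      | some b =>
        rw [List.pairwise_cons]
        refine ⟨?_, iht hl.2⟩
        intro y hy
        obtain ⟨c, hct, hgc⟩ := List.mem_filterMap.1 hy
        rw [hg a b hga, hg c y hgc]
        exact_mod_cast hl.1 c hct
  intro f
  induction f with
  | zero => intro lv acc _ hacc _; exact hacc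
  | succ f ih =>
    intro lv acc hinv hacc hcross
    match lv with
    | [] => exact hacc
    | h :: t =>
      simp only [pvLoop]
      by_cases hle : (h : Int) ≤ n
      · rw [if_pos hle]
        apply ih _ _ (pv_inv_extend _ hinv)
        · rw [List.pairwise_append]
          refine ⟨hacc, hfm
            (fun c => if decide ((c : Int) ≤ n) && ip.getD c false
                      then some (c : Int) else none)
            (fun c y hc => by dsimp only at hc; split at hc <;> simp_all) _ hinv.1, ?_⟩
          intro a ha y hy
          obtain ⟨c, hct, hgc⟩ := List.mem_filterMap.1 hy
          have hyc : y = (c : Int) := by split at hgc <;> simp_all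
          subst hyc
          exact hcross a ha c hct
        · intro a ha c' hc'
          obtain ⟨c, hct, d, hd, rfl⟩ := (pv_mem_extend _ _).1 hc'
          have hd2 : 2 ≤ d := by rcases hd with h | h | h | h <;> omega
          have hc2 : 2 ≤ c := hinv.2.1 c hct
          rcases List.mem_append.1 ha with h1 | h2
          · have := hcross a h1 c hct
            push_cast
            omega
          · obtain ⟨b, hbt, hgb⟩ := List.mem_filterMap.1 h2
            have hab : a = (b : Int) := by split at hgb <;> simp_all
            subst hab
            have := hinv.2.2 b hbt c hct
            push_cast
            omega
      · rw [if_neg hle]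
        exact hacc

-- ---- endgame ----

theorem pv_main_large (n : Int) (hn : 10 ≤ n) :
    print_super_primes n = print_super_primes_alt n := by
  have hfuel : ∀ c ∈ ([2, 3, 5, 7] : List Nat), (n : Int) < 10 ^ (n.toNat + 1) * (c : Int) := by
    intro c hc
    have h1 : n.toNat < 10 ^ n.toNat := Nat.lt_pow_self (by norm_num)
    have h2 : (10 : Nat) ^ n.toNat ≤ 10 ^ (n.toNat + 1) :=
      Nat.pow_le_pow_right (by norm_num) (by omega)
    have h3 : n < ((10 : Nat) ^ (n.toNat + 1) : Nat) := by omega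
    have h4 : (((10 : Nat) ^ (n.toNat + 1) : Nat) : Int) = (10 : Int) ^ (n.toNat + 1) := by
      push_cast; ring
    have h5 : (n : Int) < 10 ^ (n.toNat + 1) := by omega
    have hc1 : 1 ≤ (c : Int) := by
      simp only [List.mem_cons, List.not_mem_nil, or_false] at hc
      rcases hc with rfl | rfl | rfl | rfl <;> norm_num
    nlinarith [pow_pos (show (0:Int) < 10 from by norm_num) (n.toNat + 1)]
  have hinv : pvInv ([2, 3, 5, 7] : List Nat) := by
    unfold pvInv
    refine ⟨?_, ?_, ?_⟩ <;> decide
  have hBmem := pv_mem_loop n (pvSieve n) (n.toNat + 1) [2, 3, 5, 7] [] hfuel hinv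
  have hBpw := pv_loop_pairwise n (pvSieve n) (n.toNat + 1) [2, 3, 5, 7] [] hinv
    List.Pairwise.nil (by simp)
  rw [pv_A_eq_filter n]
  have hfc : (PySem.List.pyRange 2 (n + 1) 1).filter
      (fun p => (pvSieve n).getD p.toNat false &&
        (((PySem.Int.toStr p).toList.map
            (fun c => (PySem.Int.ofStr? (String.singleton c)).getD 0)).all
          (fun d => (pvSieve n).getD d.toNat false)))
      = (PySem.List.pyRange 2 (n + 1) 1).filter
        (fun p => (pvSieve n).getD p.toNat false && pvGood p.toNat) := by
    apply List.filter_congr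
    intro p hp
    have hp' := PySem.List.mem_pyRange_one.1 hp
    obtain ⟨m, rfl⟩ : ∃ m : Nat, p = (m : Int) := ⟨p.toNat, by omega⟩
    rw [Int.toNat_natCast]
    congr 1
    exact pv_digits_iff n hn m
  rw [hfc]
  set R := (PySem.List.pyRange 2 (n + 1) 1).filter
    (fun p => (pvSieve n).getD p.toNat false && pvGood p.toNat) with hRdef
  have hApw : R.Pairwise (· < ·) := (PySem.List.pairwise_lt_pyRange_one 2 (n + 1)).filter _
  have hmem : ∀ x, x ∈ print_super_primes_alt n ↔ x ∈ R := by
    intro x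
    unfold print_super_primes_alt
    rw [hBmem x]
    simp only [List.not_mem_nil, false_or]
    rw [hRdef, List.mem_filter]
    constructor
    · rintro ⟨m, ⟨c, hcl, hdesc⟩, hmn, hip, rfl⟩
      have hc2 : 2 ≤ c := by
        simp only [List.mem_cons, List.not_mem_nil, or_false] at hcl
        rcases hcl with rfl | rfl | rfl | rfl <;> norm_num
      have hgc : pvGood c = true := by
        simp only [List.mem_cons, List.not_mem_nil, or_false] at hcl
        rcases hcl with rfl | rfl | rfl | rfl <;> (rw [pvGood]; norm_num)
      have hgood : pvGood m = true := pv_good_of_desc hdesc (by omega) hgc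
      have hcm : c ≤ m := pv_desc_le hdesc
      refine ⟨PySem.List.mem_pyRange_one.2 ⟨by exact_mod_cast by omega, by omega⟩, ?_⟩
      rw [Int.toNat_natCast, hip, hgood]
      rfl
    · rintro ⟨hr, hq⟩
      have hx' := PySem.List.mem_pyRange_one.1 hr
      rw [Bool.and_eq_true] at hq
      obtain ⟨c, hcD, hdesc⟩ := pv_desc_of_good x.toNat hq.2
      have hcl : c ∈ ([2, 3, 5, 7] : List Nat) := by
        rcases hcD with rfl | rfl | rfl | rfl <;> simp
      have hxx : x = ((x.toNat : Nat) : Int) := by omega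
      exact ⟨x.toNat, ⟨c, hcl, hdesc⟩, by omega, hq.1, hxx⟩
  have hBnodup : (print_super_primes_alt n).Nodup := hBpw.imp (fun h => ne_of_lt h)
  have hAnodup : R.Nodup := hApw.imp (fun h => ne_of_lt h)
  have hperm : (print_super_primes_alt n).Perm R :=
    (List.perm_ext_iff_of_nodup hBnodup hAnodup).2 hmem
  rw [← PySem.List.sorted_eq_self_of_pairwise R (fun x => x)
    (hApw.imp (fun h => le_of_lt h))]
  exact PySem.List.sorted_eq_of_perm_of_pairwise_lt R (print_super_primes_alt n)
    (fun x => x) hperm hBpw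

theorem pv_main_small (n : Int) (h1 : 1 ≤ n) (h9 : n ≤ 9) :
    print_super_primes n = print_super_primes_alt n := by
  interval_cases n <;> decide

-- ===== VERDICT (by name: the statement is the Claim_ definition above) =====
theorem print_super_primes_spec : Claim_equal_print_super_primes := by
  intro n _ hpre
  unfold Spec_print_super_primes
  rcases le_or_gt 10 n with h | h
  · exact pv_main_large n h
  · exact pv_main_small n hpre (by omega)
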